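-- pv_equiv track=rewrite | github.com/caregor/EntPy_HW_3 | task1.py | find_missing_items
-- ===== SOURCE A (Python) =====
-- def find_missing_items(friends):
--     missing_items = {}
--     for friend, items in friends.items():
--         other_friends = set()
--         for name in friends:
--             if name != friend:
--                 other_friends.update(friends[name])
--         missing = other_friends - items
--         if missing:
--             missing_items[friend] = missing
--     return missing_items
-- ===== SOURCE B (Python) =====
-- def find_missing_items(friends):
--     # Build the union of everyone's items once, then one pass per friend:
--     # missing = total_union - own items (own items cancel out of the union).
--     total = set()
--     for items in friends.values():
--         total.update(items)
--     result = {}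
--     for friend, items in friends.items():
--         missing = total - items
--         if missing:
--             result[friend] = missing
--     return result
-- ===== Notes on version B (the rewrite author's own statement) =====
-- stated objective: alternative
-- what changed: Instead of re-scanning all other friends and re-looking-up their item sets for every friend (nested loops), B builds the union of all items once and computes each friend's missing set as total_union minus their own items (their own items cancel out of the union); intended to save the quadratic rescan, but a timing run measured only about 1.3x on the generated inputs, so no speed is claimed.
import Mathlib
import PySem

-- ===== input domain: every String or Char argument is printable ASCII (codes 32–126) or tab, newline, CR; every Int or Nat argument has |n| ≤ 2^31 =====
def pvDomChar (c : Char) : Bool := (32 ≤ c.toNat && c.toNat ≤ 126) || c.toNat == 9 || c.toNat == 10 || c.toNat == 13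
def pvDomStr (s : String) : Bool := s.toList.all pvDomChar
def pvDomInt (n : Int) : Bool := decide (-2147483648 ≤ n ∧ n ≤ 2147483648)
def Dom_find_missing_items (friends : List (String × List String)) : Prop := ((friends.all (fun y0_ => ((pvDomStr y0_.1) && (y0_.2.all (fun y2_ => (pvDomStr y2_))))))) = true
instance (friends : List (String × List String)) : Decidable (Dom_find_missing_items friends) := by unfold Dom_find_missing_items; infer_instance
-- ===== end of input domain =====

-- B builds the union of all items once and subtracts each friend's own items,
-- instead of A's per-friend rescan of all other friends (objective: alternative).

-- ===== PORT A =====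
def find_missing_items (friends : List (String × List String)) : List (String × List String) :=
  (friends.foldl (fun missing_items p =>
      let friend := p.1
      let items := p.2
      let other_friends := friends.foldl (fun s q =>
          if q.1 ≠ friend then PySem.Set.update s ((PySem.Dict.mk friends).getD q.1 []) else s)
        PySem.Set.empty
      let missing := PySem.Set.diff other_friends items
      if missing ≠ [] then missing_items.insert friend missing else missing_items)
    PySem.Dict.empty).items

-- ===== PORT B =====
def find_missing_items_alt (friends : List (String × List String)) : List (String × List String) :=
  let total := friends.foldl (fun s p => PySem.Set.update s p.2) PySem.Set.empty
  (friends.foldl (fun result p =>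
      let missing := PySem.Set.diff total p.2
      if missing ≠ [] then result.insert p.1 missing else result)
    PySem.Dict.empty).items

-- ===== PRECONDITION & SPEC =====
-- Pre_ excludes association lists with duplicate keys: a Python dict has unique keys,
-- so such lists correspond to no input A ever receives (no input A returns on is excluded).
def Pre_find_missing_items (friends : List (String × List String)) : Prop :=
  (friends.map Prod.fst).Nodup
instance (friends : List (String × List String)) : Decidable (Pre_find_missing_items friends) := by
  unfold Pre_find_missing_items; infer_instance

def pvWitness_find_missing_items : (List (String × List String)) :=
  [("amy", ["pen", "cup"]), ("bob", ["cup", "hat"])]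

def Spec_find_missing_items (friends : List (String × List String)) (out : List (String × List String)) : Prop := out = find_missing_items_alt friends
instance (friends : List (String × List String)) (out : List (String × List String)) : Decidable (Spec_find_missing_items friends out) := by unfold Spec_find_missing_items; infer_instance

-- ===== CLAIM =====
def Claim_equal_find_missing_items : Prop := ∀ (friends : List (String × List String)), Dom_find_missing_items friends → Pre_find_missing_items friends → Spec_find_missing_items friends (find_missing_items friends)

-- ===== LEMMAS AND PROOFS =====

-- a fold that updates a set with each pair's item list is one big update with the flattened lists
lemma foldl_update_flatMap (l : List (String × List String)) (s : PySem.Set String) :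
    l.foldl (fun s p => PySem.Set.update s p.2) s = PySem.Set.update s (l.flatMap Prod.snd) := by
  induction l generalizing s with
  | nil => simp [PySem.Set.update]
  | cons q l ih => simp [List.foldl_cons, ih, PySem.Set.update_append]

-- a guarded fold is the fold over the filtered list
lemma foldl_ite_filter {α β : Type} (l : List α) (p : α → Prop) [DecidablePred p]
    (g : β → α → β) (s : β) :
    l.foldl (fun s x => if p x then g s x else s) s = (l.filter (fun x => decide (p x))).foldl g s := by
  induction l generalizing s with
  | nil => rfl
  | cons x l ih =>
    by_cases h : p x <;> simp [List.foldl_cons, h, ih]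

-- filtering commutes with Python set construction
lemma filter_foldl_add (p : String → Bool) (xs : List String) (s : PySem.Set String) :
    (xs.foldl PySem.Set.add s).filter p = (xs.filter p).foldl PySem.Set.add (s.filter p) := by
  induction xs generalizing s with
  | nil => rfl
  | cons x xs ih =>
    simp only [List.foldl_cons, List.filter_cons]
    by_cases hp : p x
    · rw [if_pos hp]
      have hmem : x ∈ s.filter p ↔ x ∈ s := by simp [List.mem_filter, hp]
      by_cases hx : x ∈ s
      · rw [PySem.Set.add_of_mem hx, List.foldl_cons,
            PySem.Set.add_of_mem (hmem.mpr hx), ih]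
      · rw [PySem.Set.add_of_not_mem hx, List.foldl_cons,
            PySem.Set.add_of_not_mem (fun h => hx (hmem.mp h)), ih,
            List.filter_append]
        simp [hp]
    · rw [if_neg (by simp [hp])]
      rw [ih]
      congr 1
      unfold PySem.Set.add
      split
      · rfl
      · simp [List.filter_append, hp]

lemma filter_ofList (p : String → Bool) (xs : List String) :
    (PySem.Set.ofList xs).filter p = PySem.Set.ofList (xs.filter p) := by
  rw [PySem.Set.ofList_eq_foldl, PySem.Set.ofList_eq_foldl]
  simpa using filter_foldl_add p xs []

lemma diff_ofList (xs v : List String) :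
    PySem.Set.diff (PySem.Set.ofList xs) v
      = PySem.Set.ofList (xs.filter (fun x => !(PySem.Set.contains v x))) := by
  exact filter_ofList _ xs

-- every element of v is dropped by the filter against v
lemma filter_self_nil (v : List String) :
    v.filter (fun x => !(PySem.Set.contains v x)) = [] := by
  apply List.filter_eq_nil_iff.mpr
  intro x hx
  simp [hx]

-- per-friend agreement: A's union-of-others minus own items = B's total union minus own items
lemma missing_eq (friends : List (String × List String))
    (hnd : (friends.map Prod.fst).Nodup) (q : String × List String) (hq : q ∈ friends) :
    PySem.Set.diff
      (friends.foldl (fun s r =>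
          if r.1 ≠ q.1 then PySem.Set.update s ((PySem.Dict.mk friends).getD r.1 []) else s)
        PySem.Set.empty) q.2
    = PySem.Set.diff
        (friends.foldl (fun s p => PySem.Set.update s p.2) PySem.Set.empty) q.2 := by
  obtain ⟨l1, l2, rfl⟩ := List.append_of_mem hq
  have hkeys : ∀ r ∈ l1 ++ l2, r.1 ≠ q.1 := by
    intro r hr
    have hnd' : (List.map Prod.fst l1 ++ q.1 :: List.map Prod.fst l2).Nodup := by
      simpa using hnd
    rcases List.mem_append.mp hr with h | h
    · have h1 := (List.nodup_append.mp hnd').2.2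
      exact h1 r.1 (List.mem_map.mpr ⟨r, h, rfl⟩) q.1 (List.mem_cons_self ..)
    · have hq1 := (List.nodup_cons.mp (List.nodup_append.mp hnd').2.1).1
      intro he
      exact hq1 (List.mem_map.mpr ⟨r, h, he⟩)
  have hdnd : (PySem.Dict.mk (l1 ++ q :: l2)).keys.Nodup := hnd
  -- rewrite A's guarded fold as a fold over the filtered list
  rw [foldl_ite_filter]
  have hfilter : ((l1 ++ q :: l2).filter (fun r => decide (r.1 ≠ q.1))) = l1 ++ l2 := by
    rw [List.filter_append, List.filter_cons]
    simp only [ne_eq, decide_not]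
    have e1 : l1.filter (fun r => !decide (r.1 = q.1)) = l1 :=
      List.filter_eq_self.mpr (fun r hr => by
        simpa using hkeys r (List.mem_append.mpr (Or.inl hr)))
    have e2 : l2.filter (fun r => !decide (r.1 = q.1)) = l2 :=
      List.filter_eq_self.mpr (fun r hr => by
        simpa using hkeys r (List.mem_append.mpr (Or.inr hr)))
    simp [e1, e2]
  rw [hfilter]
  -- replace the dict lookup by the pair's own value (keys are unique)
  have hlook : ∀ (s : PySem.Set String), ∀ r ∈ l1 ++ l2,
      PySem.Set.update s ((PySem.Dict.mk (l1 ++ q :: l2)).getD r.1 []) = PySem.Set.update s r.2 := by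
    intro s r hr
    have hrm : r ∈ l1 ++ q :: l2 := by
      rcases List.mem_append.mp hr with h | h
      · exact List.mem_append.mpr (Or.inl h)
      · exact List.mem_append.mpr (Or.inr (List.mem_cons_of_mem _ h))
    have : (PySem.Dict.mk (l1 ++ q :: l2)).getD r.1 [] = r.2 := by
      have : (r.1, r.2) ∈ (PySem.Dict.mk (l1 ++ q :: l2)).items := hrm
      exact PySem.Dict.getD_of_mem_items _ this hdnd []
    rw [this]
  rw [PySem.List.foldl_congr_mem _ _ _ _ hlook]
  -- both sides are now diffs of ofList of flattened lists
  rw [foldl_update_flatMap, foldl_update_flatMap]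
  show PySem.Set.diff (PySem.Set.update [] _) _ = PySem.Set.diff (PySem.Set.update [] _) _
  rw [PySem.Set.update_nil_left, PySem.Set.update_nil_left, diff_ofList, diff_ofList]
  congr 1
  simp only [List.flatMap_append, List.flatMap_cons, List.filter_append, filter_self_nil q.2]
  simp

-- ===== VERDICT =====
theorem find_missing_items_spec : Claim_equal_find_missing_items := by
  unfold Claim_equal_find_missing_items
  intro friends _ hpre
  unfold Spec_find_missing_items find_missing_items find_missing_items_alt
  congr 1
  apply PySem.List.foldl_congr_mem
  intro acc q hq
  simp only []
  rw [missing_eq friends hpre q hq]
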